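-- pv_equiv track=rewrite | github.com/cannium/leetcode | grid-illumination.py | turnOff
-- ===== SOURCE A (Python) =====
-- direction = [
--     (-1, -1),
--     (-1, 0),
--     (-1, 1),
--     (0, -1),
--     (0, 0),
--     (0, 1),
--     (1, -1),
--     (1, 0),
--     (1, 1)
-- ]
--
-- def turnOff(qx, qy, board, N):
--     ans = []
--     for dx, dy in direction:
--         x, y = qx + dx, qy + dy
--         if x < 0 or x >= N:
--             continue
--         if y < 0 or y >= N:
--             continue
--         if (x, y) in board:
--             ans.append((x,y))
--     return ans
-- ===== SOURCE B (Python) =====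
-- def turnOff(qx, qy, board, N):
--     return sorted((x, y) for (x, y) in set(board)
--                   if qx - 1 <= x <= qx + 1 and qy - 1 <= y <= qy + 1
--                   and 0 <= x < N and 0 <= y < N)
-- ===== Notes on version B (the rewrite author's own statement) =====
-- stated objective: alternative
-- what changed: Instead of scanning the nine fixed 3x3 neighbour offsets and testing each cell's membership in board, B makes one pass over the lamps in board, keeps those inside the query's 3x3 window and the grid bounds, and returns them sorted (which reproduces the direction table's row-major order).
import Mathlib
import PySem

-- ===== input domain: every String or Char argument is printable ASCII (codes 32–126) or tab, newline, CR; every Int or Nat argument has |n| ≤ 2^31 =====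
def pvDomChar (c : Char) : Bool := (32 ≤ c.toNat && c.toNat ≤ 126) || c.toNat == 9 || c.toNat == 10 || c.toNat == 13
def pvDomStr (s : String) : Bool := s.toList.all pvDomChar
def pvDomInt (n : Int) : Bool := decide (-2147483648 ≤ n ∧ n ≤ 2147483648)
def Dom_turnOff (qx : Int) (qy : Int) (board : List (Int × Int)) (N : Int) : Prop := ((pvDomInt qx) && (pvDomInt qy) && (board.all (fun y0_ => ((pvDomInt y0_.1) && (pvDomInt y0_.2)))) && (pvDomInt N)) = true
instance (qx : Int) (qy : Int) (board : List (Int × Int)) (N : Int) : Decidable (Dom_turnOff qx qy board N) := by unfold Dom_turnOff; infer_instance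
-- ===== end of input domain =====

-- B replaces A's scan of the nine fixed 3x3 neighbour offsets with one pass over the lamps in
-- `board` (kept when inside the window and the grid), returned sorted — an alternative traversal.


-- ===== PORT A =====
def pvDirection : List (Int × Int) :=
  [(-1, -1), (-1, 0), (-1, 1), (0, -1), (0, 0), (0, 1), (1, -1), (1, 0), (1, 1)]

def turnOff (qx : Int) (qy : Int) (board : List (Int × Int)) (N : Int) : List (Int × Int) :=
  pvDirection.foldl (fun ans d =>
    let x := qx + d.1
    let y := qy + d.2
    if x < 0 ∨ x ≥ N then ans
    else if y < 0 ∨ y ≥ N then ans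
    else if (x, y) ∈ board then ans ++ [(x, y)]
    else ans) []

-- ===== PORT B =====
def turnOff_alt (qx : Int) (qy : Int) (board : List (Int × Int)) (N : Int) : List (Int × Int) :=
  PySem.List.sorted2
    ((PySem.Set.ofList board).filter (fun p =>
      decide (qx - 1 ≤ p.1 ∧ p.1 ≤ qx + 1 ∧ qy - 1 ≤ p.2 ∧ p.2 ≤ qy + 1 ∧
              0 ≤ p.1 ∧ p.1 < N ∧ 0 ≤ p.2 ∧ p.2 < N)))
    Prod.fst Prod.snd

-- ===== PRECONDITION & SPEC =====
def Spec_turnOff (qx : Int) (qy : Int) (board : List (Int × Int)) (N : Int) (out : List (Int × Int)) : Prop := out = turnOff_alt qx qy board N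
instance (qx : Int) (qy : Int) (board : List (Int × Int)) (N : Int) (out : List (Int × Int)) : Decidable (Spec_turnOff qx qy board N out) := by unfold Spec_turnOff; infer_instance

-- ===== CLAIM (what is proved, stated in full; the proofs are below) =====
def Claim_equal_turnOff : Prop := ∀ (qx : Int) (qy : Int) (board : List (Int × Int)) (N : Int), Dom_turnOff qx qy board N → Spec_turnOff qx qy board N (turnOff qx qy board N)

-- ===== LEMMAS AND PROOFS =====

-- Python's lexicographic strict order on integer pairs.
def pvLexLt (a b : Int × Int) : Prop := a.1 < b.1 ∨ (a.1 = b.1 ∧ a.2 < b.2)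

-- the boolean comparison sorted2 uses, unfolded
def pvBefore (a b : Int × Int) : Bool :=
  decide (a.1 < b.1) || (!decide (b.1 < a.1) && decide (a.2 < b.2))

theorem pvBefore_iff (a b : Int × Int) : pvBefore a b = true ↔ pvLexLt a b := by
  unfold pvBefore pvLexLt
  rcases a with ⟨a1, a2⟩; rcases b with ⟨b1, b2⟩
  simp; omega

-- insertBy with pvBefore preserves sortedness wrt ¬ pvLexLt backwards
theorem pvInsertBy_pairwise (x : Int × Int) (l : List (Int × Int))
    (h : l.Pairwise (fun a b => ¬ pvLexLt b a)) :
    (PySem.List.insertBy pvBefore x l).Pairwise (fun a b => ¬ pvLexLt b a) := by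
  induction l with
  | nil => simp [PySem.List.insertBy]
  | cons y ys ih =>
    rw [List.pairwise_cons] at h
    obtain ⟨hy, hys⟩ := h
    by_cases hb : pvBefore x y = true
    · have hxy : pvLexLt x y := (pvBefore_iff x y).1 hb
      show List.Pairwise _ (PySem.List.insertBy pvBefore x (y :: ys))
      have : PySem.List.insertBy pvBefore x (y :: ys) = x :: y :: ys := by
        simp [PySem.List.insertBy, hb]
      rw [this, List.pairwise_cons]
      refine ⟨?_, List.pairwise_cons.2 ⟨hy, hys⟩⟩
      intro z hz
      rcases List.mem_cons.1 hz with rfl | hz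
      · unfold pvLexLt at *; omega
      · have := hy z hz
        unfold pvLexLt at *; omega
    · have : PySem.List.insertBy pvBefore x (y :: ys) =
        y :: PySem.List.insertBy pvBefore x ys := by
        simp [PySem.List.insertBy, hb]
      rw [this, List.pairwise_cons]
      refine ⟨?_, ih hys⟩
      intro z hz
      rcases (PySem.List.mem_insertBy pvBefore x z ys).1 hz with heq | hz
      · rw [heq]
        exact fun h' => hb ((pvBefore_iff x y).2 h')
      · exact hy z hz

theorem pvSorted2_pairwise (xs : List (Int × Int)) :
    (PySem.List.sorted2 xs Prod.fst Prod.snd).Pairwise (fun a b => ¬ pvLexLt b a) := by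
  have key : ∀ (l : List (Int × Int)) (acc : List (Int × Int)),
      acc.Pairwise (fun a b => ¬ pvLexLt b a) →
      (List.foldl (fun acc x => PySem.List.insertBy pvBefore x acc) acc l).Pairwise
        (fun a b => ¬ pvLexLt b a) := by
    intro l
    induction l with
    | nil => intro acc h; exact h
    | cons x t ih => intro acc h; exact ih _ (pvInsertBy_pairwise x acc h)
  have hdef : PySem.List.sorted2 xs Prod.fst Prod.snd =
      List.foldl (fun acc x => PySem.List.insertBy pvBefore x acc) [] xs := rfl
  rw [hdef]
  exact key xs [] List.Pairwise.nil

-- sorted2 equals any strictly lex-sorted rearrangement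
theorem pvSorted2_eq_of_perm (xs ys : List (Int × Int)) (hperm : ys.Perm xs)
    (hp : ys.Pairwise pvLexLt) :
    PySem.List.sorted2 xs Prod.fst Prod.snd = ys := by
  have h1 := pvSorted2_pairwise xs
  have h2 : ys.Pairwise (fun a b => ¬ pvLexLt b a) := by
    refine hp.imp ?_
    intro a b hab
    unfold pvLexLt at *; omega
  have hperm2 : (PySem.List.sorted2 xs Prod.fst Prod.snd).Perm ys :=
    (PySem.List.sorted2_perm xs Prod.fst Prod.snd false).trans hperm.symm
  refine List.eq_of_perm_of_sorted ?_ h1 h2 hperm2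
  intro a b _ _ h h'
  rcases a with ⟨a1, a2⟩; rcases b with ⟨b1, b2⟩
  unfold pvLexLt at h h'
  simp at h h' ⊢
  omega

-- A's fold in filter/map form
theorem turnOff_eq_filter_map (qx qy : Int) (board : List (Int × Int)) (N : Int) :
    turnOff qx qy board N =
      ((pvDirection.filter (fun d =>
          decide (¬ (qx + d.1 < 0 ∨ qx + d.1 ≥ N) ∧ ¬ (qy + d.2 < 0 ∨ qy + d.2 ≥ N) ∧
                  (qx + d.1, qy + d.2) ∈ board))).map
        (fun d => (qx + d.1, qy + d.2))) := by
  unfold turnOff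
  have hstep : (fun (ans : List (Int × Int)) (d : Int × Int) =>
      let x := qx + d.1
      let y := qy + d.2
      if x < 0 ∨ x ≥ N then ans
      else if y < 0 ∨ y ≥ N then ans
      else if (x, y) ∈ board then ans ++ [(x, y)]
      else ans) =
      (fun ans d =>
        if (decide (¬ (qx + d.1 < 0 ∨ qx + d.1 ≥ N) ∧ ¬ (qy + d.2 < 0 ∨ qy + d.2 ≥ N) ∧
              (qx + d.1, qy + d.2) ∈ board)) = true
        then ans ++ [(qx + d.1, qy + d.2)] else ans) := by
    funext ans d
    simp only [decide_eq_true_eq]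
    split_ifs <;> tauto
  rw [hstep, PySem.List.foldl_append_if]
  simp

theorem mem_turnOff (qx qy : Int) (board : List (Int × Int)) (N : Int) (p : Int × Int) :
    p ∈ turnOff qx qy board N ↔
      (qx - 1 ≤ p.1 ∧ p.1 ≤ qx + 1 ∧ qy - 1 ≤ p.2 ∧ p.2 ≤ qy + 1 ∧
       0 ≤ p.1 ∧ p.1 < N ∧ 0 ≤ p.2 ∧ p.2 < N) ∧ p ∈ board := by
  rw [turnOff_eq_filter_map]
  simp only [List.mem_map, List.mem_filter, decide_eq_true_eq]
  constructor
  · rintro ⟨d, ⟨hd, h1, h2, h3⟩, rfl⟩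
    fin_cases hd <;>
      exact ⟨⟨by omega, by omega, by omega, by omega, by omega, by omega, by omega, by omega⟩,
             by simpa using h3⟩
  · rintro ⟨⟨w1, w2, w3, w4, w5, w6, w7, w8⟩, hmem⟩
    refine ⟨(p.1 - qx, p.2 - qy), ⟨?_, ?_, ?_, ?_⟩, ?_⟩
    · simp [pvDirection, Prod.ext_iff]; omega
    · omega
    · omega
    · have : (qx + (p.1 - qx), qy + (p.2 - qy)) = p := by
        rcases p with ⟨a, b⟩; simp
      rwa [this]
    · rcases p with ⟨a, b⟩; simp

theorem pairwise_turnOff (qx qy : Int) (board : List (Int × Int)) (N : Int) :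
    (turnOff qx qy board N).Pairwise pvLexLt := by
  rw [turnOff_eq_filter_map]
  have hdir : (pvDirection.map (fun d => (qx + d.1, qy + d.2))).Pairwise pvLexLt := by
    simp [pvDirection, List.pairwise_cons, pvLexLt]
  exact List.Pairwise.sublist (List.Sublist.map _ List.filter_sublist) hdir

theorem nodup_turnOff (qx qy : Int) (board : List (Int × Int)) (N : Int) :
    (turnOff qx qy board N).Nodup := by
  have := pairwise_turnOff qx qy board N
  refine this.imp ?_
  intro a b hab
  rcases a with ⟨a1, a2⟩; rcases b with ⟨b1, b2⟩
  unfold pvLexLt at hab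
  simp at hab ⊢
  omega

-- ===== VERDICT (by name: the statement is the Claim_ definition above) =====
theorem turnOff_spec : Claim_equal_turnOff := by
  intro qx qy board N _
  show turnOff qx qy board N = turnOff_alt qx qy board N
  unfold turnOff_alt
  refine (pvSorted2_eq_of_perm _ _ ?_ (pairwise_turnOff qx qy board N)).symm
  rw [List.perm_ext_iff_of_nodup (nodup_turnOff qx qy board N)
    ((PySem.Set.nodup_ofList board).filter _)]
  intro p
  rw [mem_turnOff]
  simp only [List.mem_filter, PySem.Set.mem_ofList, decide_eq_true_eq]
  tauto
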